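-- pv_equiv track=rewrite | github.com/MrEnvij/Task11.1 | t06.py | gen_4
-- ===== SOURCE A (Python) =====
-- def gen_4(N):
--     if N >= 1:
--         S1 = 1
--     if N >= 2:
--         S2 = -1
--     if N >= 3:
--         for n in range(3, N + 1):
--             S3 = S2 + n
--             S1, S2 = S2, S3
--             yield n, S3
-- ===== SOURCE B (Python) =====
-- def gen_4(N):
--     for n in range(3, N + 1):
--         yield n, n * (n + 1) // 2 - 4
-- ===== Notes on version B (the rewrite author's own statement) =====
-- stated objective: simpler
-- what changed: Drops the S1/S2 recurrence state entirely: each yielded pair is computed from its index n alone by the closed form n*(n+1)//2 - 4 for the running sum.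
import Mathlib
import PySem

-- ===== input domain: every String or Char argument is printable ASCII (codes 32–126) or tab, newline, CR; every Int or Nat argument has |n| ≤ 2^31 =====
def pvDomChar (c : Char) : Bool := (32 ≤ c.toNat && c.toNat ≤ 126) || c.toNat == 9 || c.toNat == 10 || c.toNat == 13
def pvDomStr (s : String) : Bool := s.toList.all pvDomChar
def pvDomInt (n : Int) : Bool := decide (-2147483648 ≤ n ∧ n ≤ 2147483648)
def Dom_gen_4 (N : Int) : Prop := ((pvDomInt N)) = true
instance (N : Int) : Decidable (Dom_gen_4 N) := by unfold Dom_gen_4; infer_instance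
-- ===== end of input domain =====

-- B replaces A's S1/S2 recurrence with the closed form (n, n*(n+1)//2 - 4) per term (simpler, stateless).


-- ===== PORT A =====
-- loop body: S3 = S2 + n; S1, S2 = S2, S3; yield n, S3  (state = (S1, S2, yielded))
def gen4step (st : Int × Int × List (Int × Int)) (n : Int) : Int × Int × List (Int × Int) :=
  let S3 := st.2.1 + n
  (st.2.1, S3, st.2.2 ++ [(n, S3)])

-- In Python S1/S2 are assigned only when N ≥ 1 / N ≥ 2; the loop (which runs only
-- when N ≥ 3) is the sole reader of them, so carrying (1, -1) unconditionally is exact.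
def gen_4 (N : Int) : List (Int × Int) :=
  ((PySem.List.pyRange 3 (N + 1) 1).foldl gen4step (1, -1, [])).2.2

-- ===== PORT B =====
def gen4term (n : Int) : Int × Int := (n, PySem.Int.floordiv (n * (n + 1)) 2 - 4)

def gen_4_alt (N : Int) : List (Int × Int) :=
  (PySem.List.pyRange 3 (N + 1) 1).map gen4term

-- ===== PRECONDITION & SPEC =====
def Spec_gen_4 (N : Int) (out : List (Int × Int)) : Prop := out = gen_4_alt N
instance (N : Int) (out : List (Int × Int)) : Decidable (Spec_gen_4 N out) := by unfold Spec_gen_4; infer_instance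

-- ===== CLAIM (what is proved, stated in full; the proofs are below) =====
def Claim_equal_gen_4 : Prop := ∀ (N : Int), Dom_gen_4 N → Spec_gen_4 N (gen_4 N)

-- ===== LEMMAS AND PROOFS =====
-- the closed-form second component
def gen4t (n : Int) : Int := PySem.Int.floordiv (n * (n + 1)) 2 - 4

theorem gen4t_succ (N : Int) : gen4t (N + 1) = gen4t N + (N + 1) := by
  unfold gen4t
  rw [PySem.Int.floordiv_eq_ediv_of_pos (by norm_num),
      PySem.Int.floordiv_eq_ediv_of_pos (by norm_num)]
  have h2 : (N + 1) * (N + 1 + 1) = N * (N + 1) + (N + 1) * 2 := by ring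
  rw [h2, Int.add_mul_ediv_right _ _ (by norm_num : (2:Int) ≠ 0)]
  ring

theorem gen4_loop_eq (N : Int) (h : 2 ≤ N) :
    ∃ s1, (PySem.List.pyRange 3 (N + 1) 1).foldl gen4step (1, -1, []) =
      (s1, gen4t N, (PySem.List.pyRange 3 (N + 1) 1).map gen4term) := by
  induction N, h using Int.le_induction with
  | base =>
      refine ⟨1, ?_⟩
      rw [PySem.List.pyRange_one_eq_nil (by norm_num)]
      simp [List.foldl]
      decide
  | succ N hN ih =>
      obtain ⟨s1, ih⟩ := ih
      rw [PySem.List.pyRange_one_succ_right (by omega : (3:Int) ≤ N + 1),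
          List.foldl_append, List.map_append, ih]
      refine ⟨gen4t N, ?_⟩
      have h3 := gen4t_succ N
      simp [gen4step, gen4term, gen4t] at h3 ⊢
      linarith [h3]

-- ===== VERDICT (by name: the statement is the Claim_ definition above) =====
theorem gen_4_spec : Claim_equal_gen_4 := by
  intro N _
  unfold Spec_gen_4 gen_4 gen_4_alt
  by_cases h : 2 ≤ N
  · obtain ⟨s1, hl⟩ := gen4_loop_eq N h
    rw [hl]
  · rw [PySem.List.pyRange_one_eq_nil (by omega)]
    simp
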